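-- pv_equiv track=rewrite | github.com/jskim7018/leetcode_study | algorithm_study/2026/02/20260211/medium/LC_3628.py | numOfSubsequences
-- ===== SOURCE A (Python) =====
-- def numOfSubsequences(s: str) -> int:
--     # 미리 LCT 갯수 계산
--     # case 1: L을 넣으면 오른쪽에 CT 갯수 확인, L을 넣을 거면 가장 왼쪽에 넣는다.
--     # case 2: C를 넣으면 왼쪽에 L의 갯수, 오른쪽에 T의 갯수 확인
--     # case 3: T를 넣으면 왼쪽의 LC 갯수 확인. T를 넣을 거면 가장 오른쪽에 넣는다.
--
--     # L -> L 갯수 LC -> C를 만났을때 이전의 L의 갯수, LCT -> T를 만났을때 이전의 LC 갯수.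
--
--     # 혹은 c를 만날때 마다 왼쪽의 l의 갯수, 오른쪽의 t의 갯수를 곱해준 것을 더하면 됨.
--     # 즉 l, t의 prefix sum을 구함. case1을 왼쪽에 항상 l이 하나 있는 것으로 하고 case3는 항상 r이 오른쪽에 더 있는것으로 함.
--     # case2의 경우 각 위치에 c를 넣어보면서 기존 lct 갯수 + 새로 찾은 lct 갯수의 max를 사용.
--     # TODO: LCT dp를 만들어서 할 수도 있음.
--     n = len(s)
--     prefix_l_cnt = [0] * n
--     prefix_t_cnt = [0] * n
--
--     for i in range(n):
--         if i - 1 >= 0: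
--             prefix_l_cnt[i] += prefix_l_cnt[i-1]
--             prefix_t_cnt[i] += prefix_t_cnt[i-1]
--         if s[i] == 'L':
--             prefix_l_cnt[i] +=1
--         elif s[i] == 'T':
--             prefix_t_cnt[i] += 1
--
--     def lct_count_with_extra() -> int:
--         ret = 0
--         extra_c_best = 0
--
--         candidates = [0, 0, 0]
--
--         for i in range(0, n):
--             left_l = 0
--             right_t = 0
--             if i-1 >= 0:
--                 left_l += prefix_l_cnt[i-1]
--             right_t += prefix_t_cnt[n-1] - prefix_t_cnt[i]
--
--             if s[i] == 'C':
--                 candidates[0] += (left_l + 1) * right_t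
--                 candidates[1] += left_l * (right_t + 1)
--                 candidates[2] += left_l * right_t
--                 ret += left_l * right_t
--
--             extra_c_best = max(extra_c_best, left_l *
--                                (prefix_t_cnt[n-1] - prefix_t_cnt[i-1]))
--         candidates[2] += extra_c_best
--         return max(candidates)
--
--     return lct_count_with_extra()
-- ===== SOURCE B (Python) =====
-- def numOfSubsequences(s: str) -> int:
--     # One left-to-right pass with scalar counters; no prefix arrays.
--     rem_t = sum(1 for ch in s if ch == 'T')  # T's at or after the current position
--     cnt_l = cnt_c = cnt_lc = cnt_ct = cnt_lct = 0
--     best_c_gain = 0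
--     for ch in s:
--         # inserting a C just before this position gains cnt_l * rem_t
--         best_c_gain = max(best_c_gain, cnt_l * rem_t)
--         if ch == 'L':
--             cnt_l += 1
--         elif ch == 'C':
--             cnt_c += 1
--             cnt_lc += cnt_l
--         elif ch == 'T':
--             cnt_ct += cnt_c
--             cnt_lct += cnt_lc
--             rem_t -= 1
--     # gains: insert L at far left -> cnt_ct; insert T at far right -> cnt_lc; insert C -> best_c_gain
--     return cnt_lct + max(cnt_ct, cnt_lc, best_c_gain)
-- ===== Notes on version B (the rewrite author's own statement) =====
-- stated objective: faster
-- what changed: Replaces A's two prefix-sum arrays and two index-based loops (with per-position array reads and a mutated candidates list) by a single left-to-right pass over scalar counters (cnt_l, cnt_c, cnt_lc, cnt_ct, cnt_lct, remaining-T and a running best C-insertion gain), returning base + max of the three insertion gains.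
import Mathlib
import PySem

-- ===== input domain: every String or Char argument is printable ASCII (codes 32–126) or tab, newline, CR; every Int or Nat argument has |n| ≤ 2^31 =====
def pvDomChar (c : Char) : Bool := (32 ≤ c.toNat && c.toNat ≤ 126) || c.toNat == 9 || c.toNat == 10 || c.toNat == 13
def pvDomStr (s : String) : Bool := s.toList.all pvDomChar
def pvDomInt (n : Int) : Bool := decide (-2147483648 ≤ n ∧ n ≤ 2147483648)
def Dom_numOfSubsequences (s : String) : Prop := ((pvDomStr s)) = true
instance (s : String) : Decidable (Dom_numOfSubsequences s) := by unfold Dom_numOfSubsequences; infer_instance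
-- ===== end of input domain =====

-- B replaces A's two prefix-sum arrays and index loops with one left-to-right pass over
-- scalar counters (measurably faster by a constant factor; O(1) extra space).

-- ===== PORT A =====
-- one step of A's first loop: builds prefix_l_cnt / prefix_t_cnt in place
def pvBuildStep (cs : List Char) (st : List Int × List Int) (i : Int) : List Int × List Int :=
  let (pl, pt) := st
  let (pl, pt) :=
    if i - 1 ≥ 0 then
      -- indices i, i-1 are always in range here (i ∈ range(n)), so .getD 0 is never taken
      (pl.set i.toNat ((PySem.List.pyGet? pl i).getD 0 + (PySem.List.pyGet? pl (i-1)).getD 0),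
       pt.set i.toNat ((PySem.List.pyGet? pt i).getD 0 + (PySem.List.pyGet? pt (i-1)).getD 0))
    else (pl, pt)
  if (PySem.List.pyGet? cs i).getD ' ' = 'L' then
    (pl.set i.toNat ((PySem.List.pyGet? pl i).getD 0 + 1), pt)
  else if (PySem.List.pyGet? cs i).getD ' ' = 'T' then
    (pl, pt.set i.toNat ((PySem.List.pyGet? pt i).getD 0 + 1))
  else (pl, pt)

-- one step of the loop inside lct_count_with_extra; state = (ret, extra_c_best, candidates)
def pvLoopStep (cs : List Char) (pl pt : List Int) (n : Int)
    (st : Int × Int × List Int) (i : Int) : Int × Int × List Int :=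
  let (ret, extraBest, cands) := st
  let leftL : Int := if i - 1 ≥ 0 then 0 + (PySem.List.pyGet? pl (i-1)).getD 0 else 0
  let rightT : Int := 0 + ((PySem.List.pyGet? pt (n-1)).getD 0 - (PySem.List.pyGet? pt i).getD 0)
  let (ret, cands) :=
    if (PySem.List.pyGet? cs i).getD ' ' = 'C' then
      (ret + leftL * rightT,
       ((cands.set 0 ((PySem.List.pyGet? cands 0).getD 0 + (leftL + 1) * rightT)).set 1
          ((PySem.List.pyGet? cands 1).getD 0 + leftL * (rightT + 1))).set 2
          ((PySem.List.pyGet? cands 2).getD 0 + leftL * rightT))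
    else (ret, cands)
  -- note: pt[i-1] at i = 0 is Python's pt[-1] (negative-index wraparound), pyGet? is exact there
  let extraBest := max extraBest
      (leftL * ((PySem.List.pyGet? pt (n-1)).getD 0 - (PySem.List.pyGet? pt (i-1)).getD 0))
  (ret, extraBest, cands)

def numOfSubsequences (s : String) : Int :=
  let cs := s.toList
  let n : Int := (cs.length : Int)
  let init : List Int × List Int :=
    (List.replicate cs.length (0 : Int), List.replicate cs.length (0 : Int))
  let pp := (PySem.List.pyRange 0 n 1).foldl (pvBuildStep cs) init
  -- lct_count_with_extra()
  let fin := (PySem.List.pyRange 0 n 1).foldl (pvLoopStep cs pp.1 pp.2 n)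
      (0, 0, ([0, 0, 0] : List Int))
  let cands := fin.2.2.set 2 ((PySem.List.pyGet? fin.2.2 2).getD 0 + fin.2.1)
  (PySem.List.max? cands (fun x => x)).getD 0

-- ===== PORT B =====
-- the loop of Source B: state = (rem_t, cnt_l, cnt_c, cnt_lc, cnt_ct, cnt_lct, best_c_gain)
def pvAltGo : List Char → Int → Int → Int → Int → Int → Int → Int → Int
  | [], _, _, _, cntLC, cntCT, cntLCT, best => cntLCT + max (max cntCT cntLC) best
  | ch :: rest, remT, cntL, cntC, cntLC, cntCT, cntLCT, best =>
    let best := max best (cntL * remT)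
    if ch = 'L' then pvAltGo rest remT (cntL + 1) cntC cntLC cntCT cntLCT best
    else if ch = 'C' then pvAltGo rest remT cntL (cntC + 1) (cntLC + cntL) cntCT cntLCT best
    else if ch = 'T' then pvAltGo rest (remT - 1) cntL cntC cntLC (cntCT + cntC) (cntLCT + cntLC) best
    else pvAltGo rest remT cntL cntC cntLC cntCT cntLCT best

def numOfSubsequences_alt (s : String) : Int :=
  let cs := s.toList
  let remT : Int := cs.foldl (fun acc ch => if ch = 'T' then acc + 1 else acc) 0
  pvAltGo cs remT 0 0 0 0 0 0

-- ===== PRECONDITION & SPEC =====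
def Spec_numOfSubsequences (s : String) (out : Int) : Prop := out = numOfSubsequences_alt s
instance (s : String) (out : Int) : Decidable (Spec_numOfSubsequences s out) := by unfold Spec_numOfSubsequences; infer_instance

-- ===== CLAIM (what is proved, stated in full; the proofs are below) =====
def Claim_equal_numOfSubsequences : Prop := ∀ (s : String), Dom_numOfSubsequences s → Spec_numOfSubsequences s (numOfSubsequences s)

-- ===== LEMMAS AND PROOFS =====
-- counters of a character list
def fL : List Char → Int
  | [] => 0
  | c :: r => (if c = 'L' then 1 else 0) + fL r
def fC : List Char → Int
  | [] => 0
  | c :: r => (if c = 'C' then 1 else 0) + fC r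
def fT : List Char → Int
  | [] => 0
  | c :: r => (if c = 'T' then 1 else 0) + fT r
def fLC : List Char → Int
  | [] => 0
  | c :: r => (if c = 'L' then fC r else 0) + fLC r
def fCT : List Char → Int
  | [] => 0
  | c :: r => (if c = 'C' then fT r else 0) + fCT r
def fLCT : List Char → Int
  | [] => 0
  | c :: r => (if c = 'L' then fCT r else 0) + fLCT r
-- Σ over C-positions of (a + L's before) * (T's after)
def fBase (a : Int) : List Char → Int
  | [] => 0
  | c :: r => (if c = 'C' then a * fT r else 0) + fBase (a + if c = 'L' then 1 else 0) r
-- running max over gap positions of (a + L's before) * (T's at or after)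
def fGain (b a : Int) : List Char → Int
  | [] => b
  | c :: r => fGain (max b (a * fT (c :: r))) (a + if c = 'L' then 1 else 0) r

lemma fBase_eq (a : Int) (cs : List Char) : fBase a cs = a * fCT cs + fLCT cs := by
  induction cs generalizing a with
  | nil => simp [fBase, fCT, fLCT]
  | cons c r ih =>
    simp only [fBase, fCT, fLCT]
    rw [ih]
    by_cases hC : c = 'C' <;> by_cases hL : c = 'L' <;> simp [hC, hL] <;> ring

lemma fT_foldl (cs : List Char) (a : Int) :
    cs.foldl (fun acc ch => if ch = 'T' then acc + 1 else acc) a = a + fT cs := by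
  induction cs generalizing a with
  | nil => simp [fT]
  | cons c r ih =>
    simp only [List.foldl_cons, fT]
    rw [ih]
    by_cases h : c = 'T' <;> simp [h] <;> ring

lemma altGo_eq (rest : List Char) : ∀ cntL cntC cntLC cntCT cntLCT best,
    pvAltGo rest (fT rest) cntL cntC cntLC cntCT cntLCT best =
      (cntLCT + cntLC * fT rest + cntL * fCT rest + fLCT rest) +
        max (max (cntCT + cntC * fT rest + fCT rest) (cntLC + cntL * fC rest + fLC rest))
          (fGain best cntL rest) := by
  induction rest with
  | nil => intro cntL cntC cntLC cntCT cntLCT best; simp [pvAltGo, fT, fC, fCT, fLC, fLCT, fGain]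
  | cons c r ih =>
    intro cntL cntC cntLC cntCT cntLCT best
    by_cases hL : c = 'L'
    · subst hL
      have hT : fT ('L' :: r) = fT r := by simp [fT]
      have h1 : ¬ ('L' : Char) = 'C' := by decide
      have h2 : ¬ ('L' : Char) = 'T' := by decide
      simp only [pvAltGo, hT, if_pos rfl, if_true]
      rw [ih]
      simp only [fGain, fT, fC, fCT, fLC, fLCT, hT, h1, h2, if_pos rfl, if_true,
        eq_self_iff_true, if_false, if_neg h1, if_neg h2]
      ring_nf
    · by_cases hC : c = 'C'
      · subst hC
        have hT : fT ('C' :: r) = fT r := by simp [fT]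
        have h2 : ¬ ('C' : Char) = 'T' := by decide
        simp only [pvAltGo, hT, if_neg hL, if_pos rfl, if_true]
        rw [ih]
        simp only [fGain, fT, fC, fCT, fLC, fLCT, hT, if_neg hL, if_neg h2,
          eq_self_iff_true, if_true, if_pos rfl]
        ring_nf
      · by_cases hTc : c = 'T'
        · subst hTc
          have hT : fT ('T' :: r) = 1 + fT r := by simp [fT]
          simp only [pvAltGo, hT, if_neg hL, if_neg hC, if_pos rfl, if_true]
          rw [show (1 : Int) + fT r - 1 = fT r by ring, ih]
          simp only [fGain, fT, fC, fCT, fLC, fLCT, hT, if_neg hL, if_neg hC,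
            eq_self_iff_true, if_true, if_pos rfl]
          ring_nf
        · have hT : fT (c :: r) = fT r := by simp [fT, hTc]
          simp only [pvAltGo, hT, if_neg hL, if_neg hC, if_neg hTc]
          rw [ih]
          simp only [fGain, fT, fC, fCT, fLC, fLCT, hT, if_neg hL, if_neg hC, if_neg hTc]
          ring_nf

-- B equals the closed form
lemma alt_closed (s : String) :
    numOfSubsequences_alt s =
      fLCT s.toList + max (max (fCT s.toList) (fLC s.toList)) (fGain 0 0 s.toList) := by
  show pvAltGo s.toList (s.toList.foldl (fun acc ch => if ch = 'T' then acc + 1 else acc) 0)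
      0 0 0 0 0 0 = _
  rw [fT_foldl, zero_add, altGo_eq]
  simp

-- prefix-count functions the arrays compute
def glf (cs : List Char) (j : Nat) : Int := fL (cs.take (j + 1))
def gtf (cs : List Char) (j : Nat) : Int := fT (cs.take (j + 1))

lemma fL_append (xs ys : List Char) : fL (xs ++ ys) = fL xs + fL ys := by
  induction xs with
  | nil => simp [fL]
  | cons c r ih => simp [fL, ih]; ring
lemma fT_append (xs ys : List Char) : fT (xs ++ ys) = fT xs + fT ys := by
  induction xs with
  | nil => simp [fT]
  | cons c r ih => simp [fT, ih]; ring

lemma set_map_range {f : Nat → Int} {n k : Nat} (hk : k < n) (v : Int) :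
    ((List.range n).map f).set k v = (List.range n).map (fun j => if j = k then v else f j) := by
  apply List.ext_getElem
  · simp
  · intro j h1 h2
    simp only [List.getElem_set, List.getElem_map, List.getElem_range]
    simp only [List.length_set, List.length_map, List.length_range] at h1
    split_ifs with h3 h4 h4 <;> first | rfl | omega

lemma glf_zero (cs : List Char) (h : 0 < cs.length) :
    glf cs 0 = if cs[0] = 'L' then 1 else 0 := by
  unfold glf
  rw [List.take_add_one, List.getElem?_eq_getElem h, fL_append]
  simp [fL]
lemma gtf_zero (cs : List Char) (h : 0 < cs.length) :
    gtf cs 0 = if cs[0] = 'T' then 1 else 0 := by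
  unfold gtf
  rw [List.take_add_one, List.getElem?_eq_getElem h, fT_append]
  simp [fT]
lemma glf_succ (cs : List Char) (k : Nat) (h : k + 1 < cs.length) :
    glf cs (k + 1) = glf cs k + (if cs.get ⟨k + 1, h⟩ = 'L' then 1 else 0) := by
  unfold glf
  rw [List.take_add_one, List.getElem?_eq_getElem h, fL_append]
  simp [fL]
lemma gtf_succ (cs : List Char) (k : Nat) (h : k + 1 < cs.length) :
    gtf cs (k + 1) = gtf cs k + (if cs.get ⟨k + 1, h⟩ = 'T' then 1 else 0) := by
  unfold gtf
  rw [List.take_add_one, List.getElem?_eq_getElem h, fT_append]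
  simp [fT]

lemma hget_map_range (cs : List Char) (g : Nat → Int) (m : Nat) (hm : m < cs.length) :
    (PySem.List.pyGet? ((List.range cs.length).map g) (m : Int)).getD 0 = g m := by
  rw [PySem.List.pyGet?_natCast]
  simp [List.getElem?_map, List.getElem?_range, hm]

lemma build_step_eq (cs : List Char) (k : Nat) (hk : k < cs.length) :
    pvBuildStep cs
      ((List.range cs.length).map (fun j => if j < k then glf cs j else 0),
       (List.range cs.length).map (fun j => if j < k then gtf cs j else 0)) (k : Int)
    = ((List.range cs.length).map (fun j => if j < k + 1 then glf cs j else 0),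
       (List.range cs.length).map (fun j => if j < k + 1 then gtf cs j else 0)) := by
  unfold pvBuildStep
  dsimp only
  have hc : (PySem.List.pyGet? cs (k : Int)).getD ' ' = cs[k] := by
    rw [PySem.List.pyGet?_natCast]
    simp [List.getElem?_eq_getElem hk]
  have htn : ((k : Int)).toNat = k := Int.toNat_natCast k
  by_cases hk0 : k = 0
  · subst hk0
    rw [if_neg (by omega : ¬(((0:Nat) : Int) - 1 ≥ 0)), hc]
    dsimp only
    by_cases hL : cs[0] = 'L'
    · rw [if_pos hL]
      simp only [Prod.mk.injEq]
      constructor <;>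
        · apply List.ext_getElem (by simp)
          intro j hj1 hj2
          simp only [List.length_set, List.length_map, List.length_range] at hj1
          by_cases hj0 : j = 0
          · subst hj0
            simp [List.getElem_set, List.getElem_map, List.getElem_range,
              PySem.List.pyGet?_natCast, List.getElem?_map, List.getElem?_range, htn, hk,
              glf_zero cs hk, gtf_zero cs hk, hL]
          · simp only [List.getElem_set, List.getElem_map, List.getElem_range, htn]
            split_ifs <;> first | rfl | omega | simp_all
    · by_cases hT : cs[0] = 'T'
      · rw [if_neg hL, if_pos hT]
        simp only [Prod.mk.injEq]
        constructor <;>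
          · apply List.ext_getElem (by simp)
            intro j hj1 hj2
            simp only [List.length_set, List.length_map, List.length_range] at hj1
            by_cases hj0 : j = 0
            · subst hj0
              simp [List.getElem_set, List.getElem_map, List.getElem_range,
                PySem.List.pyGet?_natCast, List.getElem?_map, List.getElem?_range, htn, hk,
                glf_zero cs hk, gtf_zero cs hk, hT]
            · simp only [List.getElem_set, List.getElem_map, List.getElem_range, htn]
              split_ifs <;> first | rfl | omega | simp_all
      · rw [if_neg hL, if_neg hT]
        simp only [Prod.mk.injEq]
        constructor <;>
          · apply List.ext_getElem (by simp)
            intro j hj1 hj2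
            simp only [List.length_set, List.length_map, List.length_range] at hj1
            by_cases hj0 : j = 0
            · subst hj0
              simp [List.getElem_set, List.getElem_map, List.getElem_range,
                PySem.List.pyGet?_natCast, List.getElem?_map, List.getElem?_range, htn, hk,
                glf_zero cs hk, gtf_zero cs hk, hL, hT]
            · simp only [List.getElem_set, List.getElem_map, List.getElem_range, htn]
              split_ifs <;> first | rfl | omega | simp_all
  · obtain ⟨k', rfl⟩ : ∃ k'', k = k'' + 1 := ⟨k - 1, by omega⟩
    have e1 : ((k' + 1 : Nat) : Int) - 1 = (k' : Int) := by push_cast; ring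
    rw [if_pos (by omega : ((k' + 1 : Nat) : Int) - 1 ≥ 0), e1, hc]
    dsimp only
    have hsucc : k' + 1 < cs.length := hk
    by_cases hL : cs[k' + 1] = 'L'
    · rw [if_pos hL]
      have hk' : k' < cs.length := by omega
      simp only [htn, hget_map_range, set_map_range, hk, hk']
      simp only [Prod.mk.injEq]
      constructor <;>
        · apply List.map_congr_left
          intro j hj
          rw [List.mem_range] at hj
          by_cases hjk : j = k' + 1
          · subst hjk
            simp [glf_succ cs k' hsucc, gtf_succ cs k' hsucc, List.get_eq_getElem, hL]
            try omega
          · simp only [if_neg hjk]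
            split_ifs <;> first | rfl | omega
    · by_cases hT : cs[k' + 1] = 'T'
      · rw [if_neg hL, if_pos hT]
        have hk' : k' < cs.length := by omega
        simp only [htn, hget_map_range, set_map_range, hk, hk']
        simp only [Prod.mk.injEq]
        constructor <;>
          · apply List.map_congr_left
            intro j hj
            rw [List.mem_range] at hj
            by_cases hjk : j = k' + 1
            · subst hjk
              simp [glf_succ cs k' hsucc, gtf_succ cs k' hsucc, List.get_eq_getElem, hT]
              try omega
            · simp only [if_neg hjk]
              split_ifs <;> first | rfl | omega
      · rw [if_neg hL, if_neg hT]
        have hk' : k' < cs.length := by omega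
        simp only [htn, hget_map_range, set_map_range, hk, hk']
        simp only [Prod.mk.injEq]
        constructor <;>
          · apply List.map_congr_left
            intro j hj
            rw [List.mem_range] at hj
            by_cases hjk : j = k' + 1
            · subst hjk
              simp [glf_succ cs k' hsucc, gtf_succ cs k' hsucc, List.get_eq_getElem, hL, hT]
              try omega
            · simp only [if_neg hjk]
              split_ifs <;> first | rfl | omega

lemma build_inv (cs : List Char) : ∀ (m k : Nat), k + m = cs.length →
    (PySem.List.pyRange (k : Int) (cs.length : Int) 1).foldl (pvBuildStep cs)
      ((List.range cs.length).map (fun j => if j < k then glf cs j else 0),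
       (List.range cs.length).map (fun j => if j < k then gtf cs j else 0))
    = ((List.range cs.length).map (glf cs), (List.range cs.length).map (gtf cs)) := by
  intro m
  induction m with
  | zero =>
    intro k hkm
    rw [PySem.List.pyRange_one_eq_nil (by omega), List.foldl_nil]
    simp only [Prod.mk.injEq]
    constructor <;>
      · apply List.map_congr_left
        intro j hj
        rw [List.mem_range] at hj
        rw [if_pos (by omega)]
  | succ m ih =>
    intro k hkm
    have hk : k < cs.length := by omega
    rw [PySem.List.pyRange_one_cons (by exact_mod_cast hk), List.foldl_cons,
      build_step_eq cs k hk]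
    have e1 : ((k : Int) + 1) = ((k + 1 : Nat) : Int) := by push_cast; ring
    rw [e1]
    exact ih (k + 1) (by omega)

lemma build_eq' (cs : List Char) :
    (PySem.List.pyRange 0 (cs.length : Int) 1).foldl (pvBuildStep cs)
        (List.replicate cs.length (0 : Int), List.replicate cs.length (0 : Int)) =
      ((List.range cs.length).map (glf cs), (List.range cs.length).map (gtf cs)) := by
  have h0 : ∀ (g : Nat → Int),
      List.replicate cs.length (0 : Int) =
        (List.range cs.length).map (fun j => if j < 0 then g j else 0) := by
    intro g
    symm
    rw [List.eq_replicate_iff]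
    constructor
    · simp
    · intro b hb
      simp only [List.mem_map] at hb
      obtain ⟨a, _, hab⟩ := hb
      simp at hab
      omega
  have H := build_inv cs cs.length 0 (by omega)
  rw [← h0 (glf cs), ← h0 (gtf cs)] at H
  exact_mod_cast H

lemma getD_last_map_gtf (cs : List Char) (h : 0 < cs.length) :
    (PySem.List.pyGet? ((List.range cs.length).map (gtf cs)) (-1)).getD 0 = fT cs := by
  rw [PySem.List.pyGet?_neg_one, List.getLast?_eq_getElem?]
  simp only [List.length_map, List.length_range]
  rw [List.getElem?_eq_getElem (by simp; omega)]
  simp only [List.getElem_map, List.getElem_range, Option.getD_some]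
  have e : cs.length - 1 + 1 = cs.length := by omega
  simp only [gtf, e, List.take_length]

lemma gtf_len (cs : List Char) (h : 0 < cs.length) :
    (PySem.List.pyGet? ((List.range cs.length).map (gtf cs)) ((cs.length : Int) - 1)).getD 0
      = fT cs := by
  have e1 : ((cs.length : Int) - 1) = ((cs.length - 1 : Nat) : Int) := by omega
  rw [e1, hget_map_range cs (gtf cs) (cs.length - 1) (by omega)]
  have e : cs.length - 1 + 1 = cs.length := by omega
  simp only [gtf, e, List.take_length]

lemma loop_step_eq (p : List Char) (c : Char) (r : List Char) (ret eb c0 c1 c2 : Int) :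
    pvLoopStep (p ++ c :: r) ((List.range (p ++ c :: r).length).map (glf (p ++ c :: r)))
        ((List.range (p ++ c :: r).length).map (gtf (p ++ c :: r)))
        ((p ++ c :: r).length : Int) (ret, eb, [c0, c1, c2]) (p.length : Int) =
      (ret + (if c = 'C' then fL p * fT r else 0),
       max eb (fL p * fT (c :: r)),
       [c0 + (if c = 'C' then (fL p + 1) * fT r else 0),
        c1 + (if c = 'C' then fL p * (fT r + 1) else 0),
        c2 + (if c = 'C' then fL p * fT r else 0)]) := by
  have hlen : (p ++ c :: r).length = p.length + (r.length + 1) := by simp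
  have hpos : 0 < (p ++ c :: r).length := by omega
  have hc : (PySem.List.pyGet? (p ++ c :: r) ((p.length : Nat) : Int)).getD ' ' = c := by
    rw [PySem.List.pyGet?_append_length]; rfl
  have hTcs : fT (p ++ c :: r) = fT p + ((if c = 'T' then 1 else 0) + fT r) := by
    rw [fT_append]; rfl
  have hTk : (PySem.List.pyGet? ((List.range (p ++ c :: r).length).map (gtf (p ++ c :: r)))
      ((p.length : Nat) : Int)).getD 0 = fT p + (if c = 'T' then 1 else 0) := by
    rw [hget_map_range _ _ _ (by omega)]
    simp only [gtf]
    rw [List.take_append, List.take_of_length_le (by omega),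
      show p.length + 1 - p.length = 1 by omega, List.take_succ_cons, List.take_zero, fT_append]
    simp [fT]
  unfold pvLoopStep
  dsimp only
  rw [hc, hTk, gtf_len _ hpos]
  by_cases hp0 : p.length = 0
  · obtain rfl : p = [] := List.length_eq_zero_iff.mp hp0
    simp only [List.length_nil, Nat.cast_zero]
    rw [if_neg (by omega : ¬((0:Int) - 1 ≥ 0))]
    rw [show ((0:Int) - 1) = -1 by omega, getD_last_map_gtf _ hpos]
    have hrt : fT ([] ++ c :: r) - (fT ([] : List Char) + (if c = 'T' then 1 else 0)) = fT r := by
      rw [hTcs]; ring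
    by_cases hC : c = 'C'
    · subst hC
      simp [PySem.List.pyGet?, PySem.List.pyIdx?, hrt, fL, hTcs,
        (show fT ('C' :: r) = fT r from by simp [fT])]
      all_goals and_intros <;> (try rfl) <;> ring
    · simp [hC, hrt, fL]
  · rw [if_pos (by omega : ((p.length : Nat) : Int) - 1 ≥ 0)]
    have e1 : ((p.length : Nat) : Int) - 1 = ((p.length - 1 : Nat) : Int) := by omega
    have hLk : (PySem.List.pyGet? ((List.range (p ++ c :: r).length).map (glf (p ++ c :: r)))
        (((p.length : Nat) : Int) - 1)).getD 0 = fL p := by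
      rw [e1, hget_map_range _ _ _ (by omega)]
      simp only [glf]
      have e : p.length - 1 + 1 = p.length := by omega
      rw [e, List.take_left]
    have hTkm : (PySem.List.pyGet? ((List.range (p ++ c :: r).length).map (gtf (p ++ c :: r)))
        (((p.length : Nat) : Int) - 1)).getD 0 = fT p := by
      rw [e1, hget_map_range _ _ _ (by omega)]
      simp only [gtf]
      have e : p.length - 1 + 1 = p.length := by omega
      rw [e, List.take_left]
    rw [hLk, hTkm]
    have hrt : fT (p ++ c :: r) - (fT p + (if c = 'T' then 1 else 0)) = fT r := by
      rw [hTcs]; ring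
    have hrt2 : fT (p ++ c :: r) - fT p = fT (c :: r) := by
      rw [fT_append]; ring
    by_cases hC : c = 'C'
    · subst hC
      simp [PySem.List.pyGet?, PySem.List.pyIdx?, hrt, hrt2,
        (show fT ('C' :: r) = fT r from by simp [fT])]
      all_goals and_intros <;> (try rfl) <;> ring
    · simp [hC, hrt, hrt2]

lemma loop_inv : ∀ (rest p : List Char) (ret eb c0 c1 c2 : Int),
    (PySem.List.pyRange (p.length : Int) ((p ++ rest).length : Int) 1).foldl
        (pvLoopStep (p ++ rest) ((List.range (p ++ rest).length).map (glf (p ++ rest)))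
          ((List.range (p ++ rest).length).map (gtf (p ++ rest))) ((p ++ rest).length : Int))
        (ret, eb, [c0, c1, c2])
      = (ret + fBase (fL p) rest,
         fGain eb (fL p) rest,
         [c0 + (fBase (fL p) rest + fCT rest),
          c1 + (fBase (fL p) rest + (fL p * fC rest + fLC rest)),
          c2 + fBase (fL p) rest]) := by
  intro rest
  induction rest with
  | nil =>
    intro p ret eb c0 c1 c2
    rw [List.append_nil, PySem.List.pyRange_one_eq_nil (by omega), List.foldl_nil]
    simp [fBase, fGain, fCT, fC, fLC]
  | cons c r ih =>
    intro p ret eb c0 c1 c2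
    have hk : p.length < (p ++ c :: r).length := by simp
    rw [PySem.List.pyRange_one_cons (by exact_mod_cast hk), List.foldl_cons, loop_step_eq]
    have e1 : (p.length : Int) + 1 = (((p ++ [c]).length : Nat) : Int) := by simp
    have e2 : p ++ c :: r = (p ++ [c]) ++ r := by simp
    rw [e1, e2, ih (p ++ [c])]
    by_cases hC : c = 'C' <;> by_cases hL : c = 'L' <;> by_cases hT : c = 'T' <;>
      simp [fBase, fGain, fCT, fC, fLC, fL_append, fL, fT, hC, hL, hT] <;>
      and_intros <;> (try rfl) <;> ring

lemma a_closed (s : String) :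
    numOfSubsequences s =
      fLCT s.toList + max (max (fCT s.toList) (fLC s.toList)) (fGain 0 0 s.toList) := by
  unfold numOfSubsequences
  dsimp only
  rw [build_eq']
  have H := loop_inv s.toList [] 0 0 0 0 0
  simp only [List.nil_append, List.length_nil, Nat.cast_zero, fL] at H
  simp only [zero_add] at H ⊢
  rw [H]
  dsimp only
  simp only [PySem.List.pyGet?, PySem.List.pyIdx?]
  norm_num
  rw [PySem.List.max?_id_cons]
  simp only [List.foldl]
  rw [show fBase 0 s.toList = fLCT s.toList from by rw [fBase_eq]; ring]
  simp only [show (Int.toNat 2) = 2 from rfl, List.getElem_cons_succ, List.getElem_cons_zero,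
    Option.getD_some]
  omega

-- ===== VERDICT (by name: the statement is the Claim_ definition above) =====
theorem numOfSubsequences_spec : Claim_equal_numOfSubsequences := by
  intro s _
  unfold Spec_numOfSubsequences
  rw [a_closed, alt_closed]
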